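-- pv_equiv track=rewrite | github.com/vinsav29/mind-storage | contest-ozon/e.py | solution
-- ===== SOURCE A (Python) =====
-- def solution(n, words):
--     checkSet = set()
--     resultSet = set()
--     for w in words:
--         prevC = ""
--         cnt = 1
--         newW = ""
--
--         for i, c in enumerate(w):
--             if c == prevC:
--                 cnt += 1
--                 if cnt == 3:
--                     cnt = 2
--                     continue
--             else:
--                 cnt = 1
--             newW += c
--             prevC = c
--         if newW not in checkSet:
--             resultSet.add(newW)
--         else:
--             resultSet.remove(newW)
--
--     return len(resultSet)
-- ===== SOURCE B (Python) =====
-- def solution(n, words):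
--     return len({_collapse(w) for w in words})
--
--
-- def _collapse(w):
--     # run-based collapse: each maximal run of equal chars keeps at most 2 copies
--     out = []
--     i = 0
--     while i < len(w):
--         j = i
--         while j < len(w) and w[j] == w[i]:
--             j += 1
--         out.append(w[i] * min(2, j - i))
--         i = j
--     return ''.join(out)
-- ===== Notes on version B (the rewrite author's own statement) =====
-- stated objective: simpler
-- what changed: Replaces A's per-character state machine (prevC/cnt counter with a reset-and-continue branch) and the dead checkSet/remove logic by a run-based scan that keeps min(2, run length) chars of each maximal run, collecting collapsed words in a set comprehension.
import Mathlib
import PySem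

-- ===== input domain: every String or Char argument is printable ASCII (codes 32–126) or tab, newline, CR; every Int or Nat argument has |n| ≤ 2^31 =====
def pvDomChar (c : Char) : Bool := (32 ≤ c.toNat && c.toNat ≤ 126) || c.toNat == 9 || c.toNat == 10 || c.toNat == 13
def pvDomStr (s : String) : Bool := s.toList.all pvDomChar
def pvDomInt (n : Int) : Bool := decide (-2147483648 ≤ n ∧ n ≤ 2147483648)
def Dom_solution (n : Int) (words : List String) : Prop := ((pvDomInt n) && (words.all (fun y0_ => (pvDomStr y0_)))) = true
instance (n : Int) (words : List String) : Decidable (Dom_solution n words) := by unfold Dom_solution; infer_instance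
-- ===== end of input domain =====

-- B replaces A's per-character prevC/cnt state machine (and its dead checkSet/remove branch)
-- by a run-based collapse (keep min(2, run length) chars of each maximal run) into a set; same cost, simpler.


-- ===== PORT A =====
-- inner loop body of A: state (prevC, cnt, newW); the enumerate index i is unused in A, so we fold over the chars
def solAstep (st : List Char × Int × List Char) (c : Char) : List Char × Int × List Char :=
  let (prevC, cnt, newW) := st
  if [c] = prevC then
    if cnt + 1 = 3 then (prevC, 2, newW)        -- cnt = 2; continue (no append)
    else ([c], cnt + 1, newW ++ [c])
  else ([c], 1, newW ++ [c])

-- body of A's outer loop over words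
def solOuterStep (st : PySem.Set String × PySem.Set String) (w : String) :
    PySem.Set String × PySem.Set String :=
  let checkSet := st.1
  let resultSet := st.2
  let r := w.toList.foldl solAstep (([] : List Char), (1 : Int), ([] : List Char))
  let newW := String.mk r.2.2
  if ¬ (PySem.Set.contains checkSet newW = true) then
    (checkSet, PySem.Set.add resultSet newW)
  else
    -- resultSet.remove(newW): this branch is dead (checkSet never receives an element);
    -- discard is exact whenever remove would not raise
    (checkSet, PySem.Set.discard resultSet newW)

def solution (n : Int) (words : List String) : Int :=
  let p := words.foldl solOuterStep (PySem.Set.empty, PySem.Set.empty)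
  PySem.Set.len p.2

-- ===== PORT B =====
-- run-based collapse: keep min(2, run length) copies of each maximal run's character
def collapseB : List Char → List Char
  | [] => []
  | c :: rest =>
    List.replicate (min 2 ((rest.takeWhile (· == c)).length + 1)) c
      ++ collapseB (rest.dropWhile (· == c))
termination_by l => l.length
decreasing_by
  simp only [List.length_cons]
  have := List.length_dropWhile_le (· == c) rest
  omega

def solution_alt (n : Int) (words : List String) : Int :=
  PySem.Set.len (PySem.Set.ofList (words.map (fun w => String.mk (collapseB w.toList))))

-- ===== PRECONDITION & SPEC =====
def Spec_solution (n : Int) (words : List String) (out : Int) : Prop := out = solution_alt n words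
instance (n : Int) (words : List String) (out : Int) : Decidable (Spec_solution n words out) := by unfold Spec_solution; infer_instance

-- ===== CLAIM (what is proved, stated in full; the proofs are below) =====
def Claim_equal_solution : Prop := ∀ (n : Int) (words : List String), Dom_solution n words → Spec_solution n words (solution n words)

-- ===== LEMMAS AND PROOFS =====

-- within a run: from state ([c], 2, acc), equal characters are skipped
lemma skip_run (c : Char) (l : List Char) (h : ∀ x ∈ l, x = c) (acc : List Char) :
    l.foldl solAstep ([c], (2 : Int), acc) = ([c], 2, acc) := by
  induction l with
  | nil => rfl
  | cons x xs ih =>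
    have hx : x = c := h x (List.mem_cons_self)
    subst hx
    simp only [List.foldl_cons, solAstep]
    exact ih (fun y hy => h y (List.mem_cons_of_mem _ hy))

-- main invariant: from a "fresh" state (prevC does not match the next char),
-- A's fold appends exactly collapseB l to newW
lemma collapseB_nil : collapseB [] = [] := by rw [collapseB.eq_def]

lemma collapseB_cons (c : Char) (rest : List Char) :
    collapseB (c :: rest)
      = List.replicate (min 2 ((rest.takeWhile (· == c)).length + 1)) c
          ++ collapseB (rest.dropWhile (· == c)) := by rw [collapseB.eq_def]

lemma dropWhile_head_false (p : Char → Bool) :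
    ∀ (l : List Char) (c' : Char) (rest' : List Char),
      l.dropWhile p = c' :: rest' → p c' = false := by
  intro l
  induction l with
  | nil => intro c' r h; simp [List.dropWhile] at h
  | cons x xs ih =>
    intro c' r h
    by_cases hp : p x
    · rw [List.dropWhile_cons_of_pos hp] at h
      exact ih _ _ h
    · rw [List.dropWhile_cons_of_neg hp] at h
      obtain ⟨h1, -⟩ := List.cons.inj h
      rw [← h1]
      exact Bool.eq_false_iff.mpr hp

lemma foldA_collapse (l : List Char) (prevC : List Char) (cnt : Int) (acc : List Char)
    (hfresh : ∀ c rest, l = c :: rest → prevC ≠ [c]) :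
    (l.foldl solAstep (prevC, cnt, acc)).2.2 = acc ++ collapseB l := by
  match l with
  | [] => simp [collapseB_nil]
  | c :: rest =>
    have hne : ¬ ([c] = prevC) := fun h => hfresh c rest rfl h.symm
    simp only [List.foldl_cons, solAstep, if_neg hne]
    have htw : ∀ x ∈ rest.takeWhile (· == c), x = c := by
      intro x hx
      have hb : (x == c) = true := List.mem_takeWhile_imp (p := fun y => y == c) hx
      exact eq_of_beq hb
    have hfresh' : ∀ c' rest', rest.dropWhile (· == c) = c' :: rest' → [c] ≠ [c'] := by
      intro c' rest' hd h
      have hb := dropWhile_head_false (· == c) rest c' rest' hd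
      obtain rfl : c = c' := List.singleton_inj.mp h
      simp at hb
    have hsplit : rest = rest.takeWhile (· == c) ++ rest.dropWhile (· == c) :=
      (List.takeWhile_append_dropWhile).symm
    have ih := foldA_collapse (rest.dropWhile (· == c)) [c]
    conv_lhs => rw [hsplit, List.foldl_append]
    cases hrun : rest.takeWhile (· == c) with
    | nil =>
      simp only [List.foldl_nil]
      rw [ih _ _ hfresh', collapseB_cons, hrun]
      simp
    | cons d run2 =>
      have hd : d = c := htw d (by rw [hrun]; exact List.mem_cons_self)
      subst hd
      simp only [List.foldl_cons, solAstep]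
      norm_num
      rw [skip_run d run2 (fun x hx => htw x (by rw [hrun]; exact List.mem_cons_of_mem _ hx))]
      rw [ih _ _ hfresh', collapseB_cons, hrun]
      simp [List.replicate]
termination_by l.length
decreasing_by
  simp only [List.length_cons]
  have := List.length_dropWhile_le (· == c) rest
  omega

-- per word: A's inner loop computes collapseB
lemma inner_eq (w : String) :
    (w.toList.foldl solAstep (([] : List Char), (1 : Int), ([] : List Char))).2.2
      = collapseB w.toList := by
  have := foldA_collapse w.toList [] 1 [] (by intro c rest _ h; exact absurd h (by simp))
  simpa using this

-- outer loop: checkSet stays empty, resultSet accumulates with Set.add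
lemma outer_step (rs : PySem.Set String) (w : String) :
    solOuterStep (PySem.Set.empty, rs) w
      = (PySem.Set.empty, PySem.Set.add rs (String.mk (collapseB w.toList))) := by
  simp [solOuterStep, inner_eq, PySem.Set.empty, PySem.Set.contains]

lemma outer_eq (ws : List String) (rs : PySem.Set String) :
    ws.foldl solOuterStep (PySem.Set.empty, rs)
    = (PySem.Set.empty,
       ws.foldl (fun rs w => PySem.Set.add rs (String.mk (collapseB w.toList))) rs) := by
  induction ws generalizing rs with
  | nil => rfl
  | cons w ws ih =>
    simp only [List.foldl_cons, outer_step]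
    exact ih _

lemma foldl_add_map (ws : List String) (f : String → String) (rs : PySem.Set String) :
    ws.foldl (fun rs w => PySem.Set.add rs (f w)) rs
      = (ws.map f).foldl PySem.Set.add rs := by
  induction ws generalizing rs with
  | nil => rfl
  | cons w ws ih => simp only [List.foldl_cons, List.map_cons]; exact ih _

-- ===== VERDICT (by name: the statement is the Claim_ definition above) =====
theorem solution_spec : Claim_equal_solution := by
  intro n words _
  show solution n words = solution_alt n words
  simp only [solution, solution_alt]
  rw [outer_eq]
  rw [foldl_add_map words (fun w => String.mk (collapseB w.toList)) PySem.Set.empty]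
  rw [PySem.Set.ofList_eq_foldl]
  rfl
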